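-- pv_equiv track=rewrite | github.com/TaoPeiLing/agent_platform | tools/math/calculator.py | get_unit_type
-- ===== SOURCE A (Python) =====
-- from typing import Dict, Any, Union, Optional, TYPE_CHECKING
--
-- UNIT_CONVERSIONS = {
--     # 长度单位转换 (转换为米)
--     "length": {
--         "mm": 0.001,     # 毫米
--         "cm": 0.01,      # 厘米
--         "m": 1.0,        # 米
--         "km": 1000.0,    # 千米
--         "inch": 0.0254,  # 英寸
--         "ft": 0.3048,    # 英尺
--         "yd": 0.9144,    # 码
--         "mi": 1609.344   # 英里
--     },
--     # 重量单位转换 (转换为克)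
--     "weight": {
--         "mg": 0.001,     # 毫克
--         "g": 1.0,        # 克
--         "kg": 1000.0,    # 千克
--         "t": 1000000.0,  # 吨
--         "oz": 28.349523, # 盎司
--         "lb": 453.59237, # 磅
--     },
--     # 体积单位转换 (转换为升)
--     "volume": {
--         "ml": 0.001,     # 毫升
--         "l": 1.0,        # 升
--         "m3": 1000.0,    # 立方米
--         "gal": 3.78541,  # 加仑(美制)
--         "pt": 0.473176,  # 品脱(美制)
--     },
--     # 温度单位转换 (特殊处理)
--     "temperature": {
--         "c": "celsius",     # 摄氏度
--         "f": "fahrenheit",  # 华氏度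
--         "k": "kelvin"       # 开尔文
--     }
-- }
--
-- def get_unit_type(unit1: str, unit2: str) -> Optional[str]:
--     """
--     获取单位类型 - 确定两个单位所属的类型
--
--     Args:
--         unit1: 第一个单位
--         unit2: 第二个单位
--
--     Returns:
--         单位类型，如果单位不兼容则返回None
--     """
--     # 查找每个单位所属的类型
--     unit1_type = None
--     unit2_type = None
--
--     for unit_type, units in UNIT_CONVERSIONS.items():
--         if unit1 in units:
--             unit1_type = unit_type
--         if unit2 in units:
--             unit2_type = unit_type
--
--     # 检查两个单位是否属于同一类型
--     if unit1_type and unit2_type and unit1_type == unit2_type: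
--         return unit1_type
--
--     return None
-- ===== SOURCE B (Python) =====
-- from typing import Optional
--
-- UNIT_CONVERSIONS = {
--     "length": {"mm": 0.001, "cm": 0.01, "m": 1.0, "km": 1000.0,
--                "inch": 0.0254, "ft": 0.3048, "yd": 0.9144, "mi": 1609.344},
--     "weight": {"mg": 0.001, "g": 1.0, "kg": 1000.0, "t": 1000000.0,
--                "oz": 28.349523, "lb": 453.59237},
--     "volume": {"ml": 0.001, "l": 1.0, "m3": 1000.0, "gal": 3.78541, "pt": 0.473176},
--     "temperature": {"c": "celsius", "f": "fahrenheit", "k": "kelvin"},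
-- }
--
-- # Reverse index built once: unit string -> its category (last occurrence wins,
-- # matching A's overwrite semantics; in fact all units are distinct).
-- UNIT_TO_CATEGORY = {u: cat for cat, units in UNIT_CONVERSIONS.items() for u in units}
--
-- def get_unit_type(unit1: str, unit2: str) -> Optional[str]:
--     t1 = UNIT_TO_CATEGORY.get(unit1)
--     t2 = UNIT_TO_CATEGORY.get(unit2)
--     return t1 if t1 is not None and t1 == t2 else None
-- ===== Notes on version B (the rewrite author's own statement) =====
-- stated objective: simpler
-- what changed: Replaces the per-call scan over all categories with two lookups in a module-level reverse index (unit -> category) precomputed once by a flat comprehension over UNIT_CONVERSIONS.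
import Mathlib
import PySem

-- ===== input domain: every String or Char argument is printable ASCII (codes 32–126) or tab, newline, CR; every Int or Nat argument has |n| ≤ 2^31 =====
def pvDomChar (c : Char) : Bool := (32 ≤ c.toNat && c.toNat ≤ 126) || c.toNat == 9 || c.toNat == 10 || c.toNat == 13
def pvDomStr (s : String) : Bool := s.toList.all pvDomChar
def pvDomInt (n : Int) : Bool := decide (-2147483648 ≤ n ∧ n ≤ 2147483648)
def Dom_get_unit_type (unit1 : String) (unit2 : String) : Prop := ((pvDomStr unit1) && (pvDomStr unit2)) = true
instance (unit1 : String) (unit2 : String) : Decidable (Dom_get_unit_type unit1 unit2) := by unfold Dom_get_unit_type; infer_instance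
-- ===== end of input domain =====

-- B replaces A's per-call scan over all categories with two lookups in a reverse
-- index (unit -> category) built once from the same table; objective: simpler.

-- ===== PORT A =====
-- UNIT_CONVERSIONS: only the unit KEYS matter to this function (the float/str
-- values are never read), so the table is ported as category -> list of unit keys.
def unitConversions : List (String × List String) :=
  [("length", ["mm","cm","m","km","inch","ft","yd","mi"]),
   ("weight", ["mg","g","kg","t","oz","lb"]),
   ("volume", ["ml","l","m3","gal","pt"]),
   ("temperature", ["c","f","k"])]

def get_unit_type (unit1 : String) (unit2 : String) : Option String :=
  -- the loop threads (unit1_type, unit2_type), later categories overwriting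
  let st := unitConversions.foldl
    (fun (s : Option String × Option String) p =>
      (if unit1 ∈ p.2 then some p.1 else s.1,
       if unit2 ∈ p.2 then some p.1 else s.2)) (none, none)
  -- 'if unit1_type and unit2_type and unit1_type == unit2_type': Python str truthiness = nonempty
  match st.1, st.2 with
  | some t1, some t2 => if t1 ≠ "" ∧ t2 ≠ "" ∧ t1 = t2 then some t1 else none
  | _, _ => none

-- ===== PORT B =====
-- UNIT_TO_CATEGORY = {u: cat for cat, units in UNIT_CONVERSIONS.items() for u in units}
-- (the flat comprehension yields (unit, category) pairs in table order; dict = last wins)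
def unitToCategory : PySem.Dict String String :=
  PySem.Dict.ofList
    ((([("length", ["mm","cm","m","km","inch","ft","yd","mi"]),
        ("weight", ["mg","g","kg","t","oz","lb"]),
        ("volume", ["ml","l","m3","gal","pt"]),
        ("temperature", ["c","f","k"])] : List (String × List String))).flatMap
      (fun p => p.2.map (fun u => (u, p.1))))

def get_unit_type_alt (unit1 : String) (unit2 : String) : Option String :=
  let t1 := unitToCategory.get? unit1
  let t2 := unitToCategory.get? unit2
  -- 't1 if t1 is not None and t1 == t2 else None'
  match t1 with
  | none => none
  | some a => match t2 with
    | none => none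
    | some b => if a = b then some a else none

-- ===== PRECONDITION & SPEC =====
def Spec_get_unit_type (unit1 : String) (unit2 : String) (out : Option String) : Prop := out = get_unit_type_alt unit1 unit2
instance (unit1 : String) (unit2 : String) (out : Option String) : Decidable (Spec_get_unit_type unit1 unit2 out) := by unfold Spec_get_unit_type; infer_instance

-- ===== CLAIM (what is proved, stated in full; the proofs are below) =====
def Claim_equal_get_unit_type : Prop := ∀ (unit1 : String) (unit2 : String), Dom_get_unit_type unit1 unit2 → Spec_get_unit_type unit1 unit2 (get_unit_type unit1 unit2)

-- ===== LEMMAS AND PROOFS =====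

-- A's per-unit classification: what the loop computes for a single unit
def classA (u : String) : Option String :=
  unitConversions.foldl (fun s p => if u ∈ p.2 then some p.1 else s) none

def allUnits : List String :=
  ["mm","cm","m","km","inch","ft","yd","mi","mg","g","kg","t","oz","lb","ml","l","m3","gal","pt","c","f","k"]

lemma unitToCategory_eq : unitToCategory = PySem.Dict.mk [("mm","length"),("cm","length"),("m","length"),("km","length"),("inch","length"),("ft","length"),("yd","length"),("mi","length"),("mg","weight"),("g","weight"),("kg","weight"),("t","weight"),("oz","weight"),("lb","weight"),("ml","volume"),("l","volume"),("m3","volume"),("gal","volume"),("pt","volume"),("c","temperature"),("f","temperature"),("k","temperature")] := by decide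

lemma classify_eq (u : String) : classA u = unitToCategory.get? u := by
  by_cases h : u ∈ allUnits
  · fin_cases h <;> rfl
  · simp [allUnits] at h
    obtain ⟨h1,h2,h3,h4,h5,h6,h7,h8,h9,h10,h11,h12,h13,h14,h15,h16,h17,h18,h19,h20,h21,h22⟩ := h
    rw [unitToCategory_eq]
    simp [classA, unitConversions, PySem.Dict.get?, List.foldl,
      h1,h2,h3,h4,h5,h6,h7,h8,h9,h10,h11,h12,h13,h14,h15,h16,h17,h18,h19,h20,h21,h22,
      Ne.symm h1,Ne.symm h2,Ne.symm h3,Ne.symm h4,Ne.symm h5,Ne.symm h6,Ne.symm h7,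
      Ne.symm h8,Ne.symm h9,Ne.symm h10,Ne.symm h11,Ne.symm h12,Ne.symm h13,Ne.symm h14,
      Ne.symm h15,Ne.symm h16,Ne.symm h17,Ne.symm h18,Ne.symm h19,Ne.symm h20,Ne.symm h21,
      Ne.symm h22]

-- a classified category name is never the empty string (A's truthiness guard always passes)
lemma classA_ne_empty (u : String) (t : String) (h : classA u = some t) : t ≠ "" := by
  unfold classA unitConversions at h
  simp only [List.foldl] at h
  split_ifs at h <;> simp_all <;> subst h <;> decide

-- A's pair-threaded loop decomposes into two independent classifications
lemma A_eq (u1 u2 : String) :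
    get_unit_type u1 u2 =
      (match classA u1, classA u2 with
       | some t1, some t2 => if t1 ≠ "" ∧ t2 ≠ "" ∧ t1 = t2 then some t1 else none
       | _, _ => none) := by
  simp only [get_unit_type, classA, unitConversions, List.foldl]

-- ===== VERDICT (by name: the statement is the Claim_ definition above) =====
theorem get_unit_type_spec : Claim_equal_get_unit_type := by
  intro u1 u2 _
  unfold Spec_get_unit_type
  rw [A_eq]
  unfold get_unit_type_alt
  rw [← classify_eq, ← classify_eq]
  rcases h1 : classA u1 with _ | t1 <;> rcases h2 : classA u2 with _ | t2 <;> simp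
  have n1 := classA_ne_empty u1 t1 h1
  have n2 := classA_ne_empty u2 t2 h2
  by_cases he : t1 = t2 <;> simp [he, n1, n2]
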